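-- pv_equiv track=rewrite | github.com/mpbraendli/mmbtools-aux | tii/tii.py | calculate_A_c_p
-- ===== SOURCE A (Python) =====
-- TII_PATTERN = [ # {{{
--     [0,0,0,0,1,1,1,1],
--     [0,0,0,1,0,1,1,1],
--     [0,0,0,1,1,0,1,1],
--     [0,0,0,1,1,1,0,1],
--     [0,0,0,1,1,1,1,0],
--     [0,0,1,0,0,1,1,1],
--     [0,0,1,0,1,0,1,1],
--     [0,0,1,0,1,1,0,1],
--     [0,0,1,0,1,1,1,0],
--     [0,0,1,1,0,0,1,1],
--     [0,0,1,1,0,1,0,1],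
--     [0,0,1,1,0,1,1,0],
--     [0,0,1,1,1,0,0,1],
--     [0,0,1,1,1,0,1,0],
--     [0,0,1,1,1,1,0,0],
--     [0,1,0,0,0,1,1,1],
--     [0,1,0,0,1,0,1,1],
--     [0,1,0,0,1,1,0,1],
--     [0,1,0,0,1,1,1,0],
--     [0,1,0,1,0,0,1,1],
--     [0,1,0,1,0,1,0,1],
--     [0,1,0,1,0,1,1,0],
--     [0,1,0,1,1,0,0,1],
--     [0,1,0,1,1,0,1,0],
--     [0,1,0,1,1,1,0,0],
--     [0,1,1,0,0,0,1,1],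
--     [0,1,1,0,0,1,0,1],
--     [0,1,1,0,0,1,1,0],
--     [0,1,1,0,1,0,0,1],
--     [0,1,1,0,1,0,1,0],
--     [0,1,1,0,1,1,0,0],
--     [0,1,1,1,0,0,0,1],
--     [0,1,1,1,0,0,1,0],
--     [0,1,1,1,0,1,0,0],
--     [0,1,1,1,1,0,0,0],
--     [1,0,0,0,0,1,1,1],
--     [1,0,0,0,1,0,1,1],
--     [1,0,0,0,1,1,0,1],
--     [1,0,0,0,1,1,1,0],
--     [1,0,0,1,0,0,1,1],
--     [1,0,0,1,0,1,0,1],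
--     [1,0,0,1,0,1,1,0],
--     [1,0,0,1,1,0,0,1],
--     [1,0,0,1,1,0,1,0],
--     [1,0,0,1,1,1,0,0],
--     [1,0,1,0,0,0,1,1],
--     [1,0,1,0,0,1,0,1],
--     [1,0,1,0,0,1,1,0],
--     [1,0,1,0,1,0,0,1],
--     [1,0,1,0,1,0,1,0],
--     [1,0,1,0,1,1,0,0],
--     [1,0,1,1,0,0,0,1],
--     [1,0,1,1,0,0,1,0],
--     [1,0,1,1,0,1,0,0],
--     [1,0,1,1,1,0,0,0],
--     [1,1,0,0,0,0,1,1],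
--     [1,1,0,0,0,1,0,1],
--     [1,1,0,0,0,1,1,0],
--     [1,1,0,0,1,0,0,1],
--     [1,1,0,0,1,0,1,0],
--     [1,1,0,0,1,1,0,0],
--     [1,1,0,1,0,0,0,1],
--     [1,1,0,1,0,0,1,0],
--     [1,1,0,1,0,1,0,0],
--     [1,1,0,1,1,0,0,0],
--     [1,1,1,0,0,0,0,1],
--     [1,1,1,0,0,0,1,0],
--     [1,1,1,0,0,1,0,0],
--     [1,1,1,0,1,0,0,0],
--     [1,1,1,1,0,0,0,0] ] # }}}
--
-- def calculate_A_c_p(c, p, k):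
--     """ETSI EN 300 401 14.8.1"""
--     r = 0
--
--     if k == 0 or k == -769:
--         return 0
--     elif -768 <= k and k < -384:
--         for b in range(8):
--             if k == -768 + 2*c + 48*b and TII_PATTERN[p][b]:
--                 r += 1
--     elif -384 <= k and k < 0:
--         for b in range(8):
--             if k == -384 + 2*c + 48*b and TII_PATTERN[p][b]:
--                 r += 1
--     elif 0 < k and k <= 384:
--         for b in range(8):
--             if k == 1 + 2*c + 48*b and TII_PATTERN[p][b]:
--                 r += 1
--     elif 384 < k and k <= 768:
--         for b in range(8):
--             if k == 385 + 2*c + 48*b and TII_PATTERN[p][b]: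
--                 r += 1
--     else:
--         raise ValueError("Invalid k={}".format(k))
--
--     # I'm expecting that r means "enable or disable", nothing else
--     assert(r < 2);
--     return r
-- ===== SOURCE B (Python) =====
-- # Each spec pattern stored as an 8-bit mask: bit b of TII_MASKS[p] is TII_PATTERN[p][b].
-- TII_MASKS = [
--     240, 232, 216, 184, 120, 228, 212, 180, 116, 204, 172, 108, 156, 92, 60,
--     226, 210, 178, 114, 202, 170, 106, 154, 90, 58, 198, 166, 102, 150, 86,
--     54, 142, 78, 46, 30, 225, 209, 177, 113, 201, 169, 105, 153, 89, 57, 197,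
--     165, 101, 149, 85, 53, 141, 77, 45, 29, 195, 163, 99, 147, 83, 51, 139,
--     75, 43, 27, 135, 71, 39, 23, 15]
--
-- def _solve(c, p, k, base):
--     """solve k == base + 2*c + 48*b for b; pattern bit if b is a valid sub-id, else 0"""
--     b, m = divmod(k - base - 2 * c, 48)
--     if m == 0 and 0 <= b < 8:
--         return (TII_MASKS[p] >> b) & 1
--     return 0
--
-- def calculate_A_c_p(c, p, k):
--     """ETSI EN 300 401 14.8.1 -- closed-form base + divmod solve + bitmask lookup"""
--     if k == 0 or k == -769:
--         return 0
--     if not (-769 <= k <= 768):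
--         raise ValueError("Invalid k={}".format(k))
--     if k > 0:
--         base = 1 + 384 * ((k - 1) // 384)
--     else:
--         base = -768 + 384 * ((k + 768) // 384)
--     return _solve(c, p, k, base)
-- ===== Notes on version B (the rewrite author's own statement) =====
-- stated objective: simpler
-- what changed: Replaces each branch's scan over b in range(8) with a single closed-form base computation (one sign-split floor-division formula instead of four loop branches) plus a divmod solve of k = base + 2*c + 48*b, and stores the 70 spec patterns as 8-bit integer masks queried with a shift instead of lists of 0/1.
import Mathlib
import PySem

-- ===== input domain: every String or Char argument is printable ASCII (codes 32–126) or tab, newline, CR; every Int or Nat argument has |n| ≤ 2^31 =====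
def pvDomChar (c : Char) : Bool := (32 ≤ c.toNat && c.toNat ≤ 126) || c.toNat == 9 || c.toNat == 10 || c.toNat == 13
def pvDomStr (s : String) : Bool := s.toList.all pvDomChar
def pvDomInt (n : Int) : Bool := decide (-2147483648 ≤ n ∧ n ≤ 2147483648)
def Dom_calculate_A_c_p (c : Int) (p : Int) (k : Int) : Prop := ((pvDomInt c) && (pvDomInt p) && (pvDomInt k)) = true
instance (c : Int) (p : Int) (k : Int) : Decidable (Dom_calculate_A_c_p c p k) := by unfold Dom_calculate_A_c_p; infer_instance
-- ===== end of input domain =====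

-- B replaces A's four 8-iteration scans by a closed-form base + divmod solve, and the table of
-- 0/1 lists by 8-bit masks (simpler; same values).

-- ===== PORT A =====
def TII_PATTERN : List (List Int) := [
  [0, 0, 0, 0, 1, 1, 1, 1],
  [0, 0, 0, 1, 0, 1, 1, 1],
  [0, 0, 0, 1, 1, 0, 1, 1],
  [0, 0, 0, 1, 1, 1, 0, 1],
  [0, 0, 0, 1, 1, 1, 1, 0],
  [0, 0, 1, 0, 0, 1, 1, 1],
  [0, 0, 1, 0, 1, 0, 1, 1],
  [0, 0, 1, 0, 1, 1, 0, 1],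
  [0, 0, 1, 0, 1, 1, 1, 0],
  [0, 0, 1, 1, 0, 0, 1, 1],
  [0, 0, 1, 1, 0, 1, 0, 1],
  [0, 0, 1, 1, 0, 1, 1, 0],
  [0, 0, 1, 1, 1, 0, 0, 1],
  [0, 0, 1, 1, 1, 0, 1, 0],
  [0, 0, 1, 1, 1, 1, 0, 0],
  [0, 1, 0, 0, 0, 1, 1, 1],
  [0, 1, 0, 0, 1, 0, 1, 1],
  [0, 1, 0, 0, 1, 1, 0, 1],
  [0, 1, 0, 0, 1, 1, 1, 0],
  [0, 1, 0, 1, 0, 0, 1, 1],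
  [0, 1, 0, 1, 0, 1, 0, 1],
  [0, 1, 0, 1, 0, 1, 1, 0],
  [0, 1, 0, 1, 1, 0, 0, 1],
  [0, 1, 0, 1, 1, 0, 1, 0],
  [0, 1, 0, 1, 1, 1, 0, 0],
  [0, 1, 1, 0, 0, 0, 1, 1],
  [0, 1, 1, 0, 0, 1, 0, 1],
  [0, 1, 1, 0, 0, 1, 1, 0],
  [0, 1, 1, 0, 1, 0, 0, 1],
  [0, 1, 1, 0, 1, 0, 1, 0],
  [0, 1, 1, 0, 1, 1, 0, 0],
  [0, 1, 1, 1, 0, 0, 0, 1],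
  [0, 1, 1, 1, 0, 0, 1, 0],
  [0, 1, 1, 1, 0, 1, 0, 0],
  [0, 1, 1, 1, 1, 0, 0, 0],
  [1, 0, 0, 0, 0, 1, 1, 1],
  [1, 0, 0, 0, 1, 0, 1, 1],
  [1, 0, 0, 0, 1, 1, 0, 1],
  [1, 0, 0, 0, 1, 1, 1, 0],
  [1, 0, 0, 1, 0, 0, 1, 1],
  [1, 0, 0, 1, 0, 1, 0, 1],
  [1, 0, 0, 1, 0, 1, 1, 0],
  [1, 0, 0, 1, 1, 0, 0, 1],
  [1, 0, 0, 1, 1, 0, 1, 0],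
  [1, 0, 0, 1, 1, 1, 0, 0],
  [1, 0, 1, 0, 0, 0, 1, 1],
  [1, 0, 1, 0, 0, 1, 0, 1],
  [1, 0, 1, 0, 0, 1, 1, 0],
  [1, 0, 1, 0, 1, 0, 0, 1],
  [1, 0, 1, 0, 1, 0, 1, 0],
  [1, 0, 1, 0, 1, 1, 0, 0],
  [1, 0, 1, 1, 0, 0, 0, 1],
  [1, 0, 1, 1, 0, 0, 1, 0],
  [1, 0, 1, 1, 0, 1, 0, 0],
  [1, 0, 1, 1, 1, 0, 0, 0],
  [1, 1, 0, 0, 0, 0, 1, 1],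
  [1, 1, 0, 0, 0, 1, 0, 1],
  [1, 1, 0, 0, 0, 1, 1, 0],
  [1, 1, 0, 0, 1, 0, 0, 1],
  [1, 1, 0, 0, 1, 0, 1, 0],
  [1, 1, 0, 0, 1, 1, 0, 0],
  [1, 1, 0, 1, 0, 0, 0, 1],
  [1, 1, 0, 1, 0, 0, 1, 0],
  [1, 1, 0, 1, 0, 1, 0, 0],
  [1, 1, 0, 1, 1, 0, 0, 0],
  [1, 1, 1, 0, 0, 0, 0, 1],
  [1, 1, 1, 0, 0, 0, 1, 0],
  [1, 1, 1, 0, 0, 1, 0, 0],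
  [1, 1, 1, 0, 1, 0, 0, 0],
  [1, 1, 1, 1, 0, 0, 0, 0]]

-- TII_PATTERN[p][b]; the defaults are unreachable under Pre_ (Python raises IndexError there)
def pvEntry (p b : Int) : Int :=
  (PySem.List.pyGet? ((PySem.List.pyGet? TII_PATTERN p).getD []) b).getD 0

-- the four identical 'for b in range(8)' loops of A, parameterised by the branch base
def pvLoopA (c : Int) (p : Int) (k : Int) (base : Int) : Int :=
  List.foldl (fun r b => if k = base + 2*c + 48*b ∧ pvEntry p b ≠ 0 then r + 1 else r) 0
    (PySem.List.pyRange 0 8 1)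

def calculate_A_c_p (c : Int) (p : Int) (k : Int) : Int :=
  if k = 0 ∨ k = -769 then 0
  else if -768 ≤ k ∧ k < -384 then pvLoopA c p k (-768)
  else if -384 ≤ k ∧ k < 0 then pvLoopA c p k (-384)
  else if 0 < k ∧ k ≤ 384 then pvLoopA c p k 1
  else if 384 < k ∧ k ≤ 768 then pvLoopA c p k 385
  else 0  -- Python raises ValueError here; excluded by Pre_

-- ===== PORT B =====
-- bit b of TII_MASKS[p] is TII_PATTERN[p][b]
def TII_MASKS : List Int := [
  240, 232, 216, 184, 120, 228, 212, 180, 116, 204, 172, 108, 156, 92, 60,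
  226, 210, 178, 114, 202, 170, 106, 154, 90, 58, 198, 166, 102, 150, 86,
  54, 142, 78, 46, 30, 225, 209, 177, 113, 201, 169, 105, 153, 89, 57, 197,
  165, 101, 149, 85, 53, 141, 77, 45, 29, 195, 163, 99, 147, 83, 51, 139,
  75, 43, 27, 135, 71, 39, 23, 15]

-- (TII_MASKS[p] >> b) & 1; masks and b are nonnegative, so the Nat shift/and are exact;
-- the getD default is unreachable under Pre_ (Python raises IndexError there)
def pvBit (p b : Int) : Int :=
  (((((PySem.List.pyGet? TII_MASKS p).getD 0).toNat >>> b.toNat) &&& 1 : Nat) : Int)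

-- _solve: b, m = divmod(k - base - 2*c, 48); pattern bit if b valid, else 0
def pvSolveB (c : Int) (p : Int) (k : Int) (base : Int) : Int :=
  let b := PySem.Int.floordiv (k - base - 2*c) 48
  let m := PySem.Int.mod (k - base - 2*c) 48
  if m = 0 ∧ 0 ≤ b ∧ b < 8 then pvBit p b else 0

def calculate_A_c_p_alt (c : Int) (p : Int) (k : Int) : Int :=
  if k = 0 ∨ k = -769 then 0
  else if ¬(-769 ≤ k ∧ k ≤ 768) then 0  -- Python raises ValueError here; excluded by Pre_
  else pvSolveB c p k
    (if 0 < k then 1 + 384 * PySem.Int.floordiv (k - 1) 384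
     else -768 + 384 * PySem.Int.floordiv (k + 768) 384)

-- ===== PRECONDITION & SPEC =====
-- does some b in range(8) satisfy k == base + 2*c + 48*b (then Python indexes TII_PATTERN[p])
def pvHit (c : Int) (k : Int) (base : Int) : Prop :=
  (k - base - 2*c) % 48 = 0 ∧ 0 ≤ (k - base - 2*c) / 48 ∧ (k - base - 2*c) / 48 < 8

def pvHitAny (c : Int) (k : Int) : Prop :=
  ¬(k = 0 ∨ k = -769) ∧
  ((-768 ≤ k ∧ k < -384 ∧ pvHit c k (-768)) ∨ (-384 ≤ k ∧ k < 0 ∧ pvHit c k (-384)) ∨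
   (0 < k ∧ k ≤ 384 ∧ pvHit c k 1) ∨ (384 < k ∧ k ≤ 768 ∧ pvHit c k 385))

-- Pre_ = exactly the inputs where Python A returns: k in [-769,768] (else ValueError), and when
-- the carrier equation has a solution b the pattern row index p must be a valid Python index
-- into the 70-row table (else IndexError).
def Pre_calculate_A_c_p (c : Int) (p : Int) (k : Int) : Prop :=
  -769 ≤ k ∧ k ≤ 768 ∧ (pvHitAny c k → (-70 ≤ p ∧ p < 70))
instance (c : Int) (p : Int) (k : Int) : Decidable (Pre_calculate_A_c_p c p k) := by
  unfold Pre_calculate_A_c_p pvHitAny pvHit; infer_instance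

def pvWitness_calculate_A_c_p : Int × Int × Int := (0, 0, 1)

def Spec_calculate_A_c_p (c : Int) (p : Int) (k : Int) (out : Int) : Prop := out = calculate_A_c_p_alt c p k
instance (c : Int) (p : Int) (k : Int) (out : Int) : Decidable (Spec_calculate_A_c_p c p k out) := by unfold Spec_calculate_A_c_p; infer_instance

-- ===== CLAIM (what is proved, stated in full; the proofs are below) =====
def Claim_equal_calculate_A_c_p : Prop := ∀ (c : Int) (p : Int) (k : Int), Dom_calculate_A_c_p c p k → Pre_calculate_A_c_p c p k → Spec_calculate_A_c_p c p k (calculate_A_c_p c p k)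

-- ===== LEMMAS AND PROOFS =====

theorem pvEntry01 (p b : Int) : pvEntry p b = 0 ∨ pvEntry p b = 1 := by
  unfold pvEntry
  have hall : ∀ row ∈ TII_PATTERN, ∀ x ∈ row, x = 0 ∨ x = 1 := by decide
  cases hrow : PySem.List.pyGet? TII_PATTERN p with
  | none => simp [PySem.List.pyGet?]
  | some row =>
    cases hx : PySem.List.pyGet? row b with
    | none => simp [hx]
    | some x =>
      simp only [Option.getD_some, hx]
      exact hall row (PySem.List.mem_of_pyGet?_eq_some _ hrow) x (PySem.List.mem_of_pyGet?_eq_some _ hx)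

-- the mask table agrees with the pattern table on every valid Python index pair
set_option maxRecDepth 4000 in
theorem entry_eq_bit : ∀ p ∈ Finset.Icc (-70 : Int) 69, ∀ b ∈ Finset.Icc (0 : Int) 7,
    pvEntry p b = pvBit p b := by decide

theorem foldl_count48 (f : Int → Int) (k A : Int) (L : List Int) (hL : L.Nodup) (r0 : Int) :
    List.foldl (fun r b => if k = A + 48*b ∧ f b ≠ 0 then r + 1 else r) r0 L
      = r0 + (if ∃ b ∈ L, k = A + 48*b ∧ f b ≠ 0 then 1 else 0) := by
  induction L generalizing r0 with
  | nil => simp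
  | cons x xs ih =>
    rcases List.nodup_cons.mp hL with ⟨hx, hxs⟩
    by_cases hcx : k = A + 48*x ∧ f x ≠ 0
    · have hno : ¬ ∃ b ∈ xs, k = A + 48*b ∧ f b ≠ 0 := by
        rintro ⟨b, hb, hb1, hb2⟩
        have : b = x := by omega
        exact hx (this ▸ hb)
      simp only [List.foldl_cons, if_pos hcx, ih hxs]
      have hex : ∃ b ∈ x :: xs, k = A + 48*b ∧ f b ≠ 0 := ⟨x, List.mem_cons_self .., hcx⟩
      rw [if_neg hno, if_pos hex]
      omega
    · simp only [List.foldl_cons, if_neg hcx, ih hxs]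
      congr 1
      have hiff : (∃ b ∈ xs, k = A + 48*b ∧ f b ≠ 0)
          ↔ (∃ b ∈ x :: xs, k = A + 48*b ∧ f b ≠ 0) := by
        constructor
        · rintro ⟨b, hb, hc⟩; exact ⟨b, List.mem_cons_of_mem _ hb, hc⟩
        · rintro ⟨b, hb, hc⟩
          rcases List.mem_cons.mp hb with rfl | hb
          · exact absurd hc hcx
          · exact ⟨b, hb, hc⟩
      exact if_congr hiff rfl rfl

-- A's scan over a branch equals the divmod solve returning the mask bit, provided p is a valid
-- row index whenever the branch hits (Pre_ supplies that)
theorem branch_eq (c p k base : Int) (hp : pvHit c k base → (-70 ≤ p ∧ p < 70)) :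
    pvLoopA c p k base = pvSolveB c p k base := by
  have hrange : PySem.List.pyRange 0 8 1 = [0,1,2,3,4,5,6,7] := by decide
  unfold pvLoopA pvSolveB
  rw [hrange]
  rw [show (fun (r b : Int) => if k = base + 2*c + 48*b ∧ pvEntry p b ≠ 0 then r + 1 else r)
        = (fun (r b : Int) => if k = (base + 2*c) + 48*b ∧ pvEntry p b ≠ 0 then r + 1 else r) from rfl]
  rw [foldl_count48 (pvEntry p) k (base + 2*c) [0,1,2,3,4,5,6,7] (by decide) 0]
  have hfd : PySem.Int.floordiv (k - base - 2*c) 48 = (k - base - 2*c) / 48 :=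
    PySem.Int.floordiv_eq_ediv_of_pos (by norm_num)
  have hmd : PySem.Int.mod (k - base - 2*c) 48 = (k - base - 2*c) % 48 :=
    PySem.Int.mod_eq_emod_of_pos (by norm_num)
  rw [hfd, hmd]
  set m := k - base - 2*c with hm
  by_cases hc : m % 48 = 0 ∧ 0 ≤ m / 48 ∧ m / 48 < 8
  · set b0 := m / 48 with hb0
    have hkb : k = (base + 2*c) + 48*b0 := by
      have := Int.mul_ediv_add_emod m 48
      omega
    have hpv : -70 ≤ p ∧ p < 70 := hp hc
    have heb : pvEntry p b0 = pvBit p b0 :=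
      entry_eq_bit p (Finset.mem_Icc.mpr ⟨hpv.1, by omega⟩)
        b0 (Finset.mem_Icc.mpr ⟨hc.2.1, by omega⟩)
    have hmem : b0 ∈ ([0,1,2,3,4,5,6,7] : List Int) := by
      have h1 : 0 ≤ b0 := hc.2.1
      have h2 : b0 < 8 := hc.2.2
      interval_cases b0 <;> decide
    rcases pvEntry01 p b0 with h01 | h01
    · have hno : ¬ ∃ b ∈ ([0,1,2,3,4,5,6,7] : List Int), k = (base + 2*c) + 48*b ∧ pvEntry p b ≠ 0 := by
        rintro ⟨b, hb, hb1, hb2⟩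
        have : b = b0 := by omega
        exact hb2 (this ▸ h01)
      rw [if_neg hno, if_pos hc, ← heb, h01]
      norm_num
    · have hex : ∃ b ∈ ([0,1,2,3,4,5,6,7] : List Int), k = (base + 2*c) + 48*b ∧ pvEntry p b ≠ 0 :=
        ⟨b0, hmem, hkb, by rw [h01]; norm_num⟩
      rw [if_pos hex, if_pos hc, ← heb, h01]
      norm_num
  · have hno : ¬ ∃ b ∈ ([0,1,2,3,4,5,6,7] : List Int), k = (base + 2*c) + 48*b ∧ pvEntry p b ≠ 0 := by
      rintro ⟨b, hb, hb1, hb2⟩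
      simp only [List.mem_cons, List.not_mem_nil, or_false] at hb
      have hmb : m = 48 * b := by omega
      exact hc ⟨by omega, by omega, by omega⟩
    rw [if_neg hno, if_neg hc]
    norm_num

-- B's closed-form base equals the branch base on each interval
theorem base_pos_lo {k : Int} (h1 : 0 < k) (h2 : k ≤ 384) :
    (1 + 384 * PySem.Int.floordiv (k - 1) 384 : Int) = 1 := by
  rw [PySem.Int.floordiv_eq_ediv_of_pos (by norm_num)]; omega

theorem base_pos_hi {k : Int} (h1 : 384 < k) (h2 : k ≤ 768) :
    (1 + 384 * PySem.Int.floordiv (k - 1) 384 : Int) = 385 := by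
  rw [PySem.Int.floordiv_eq_ediv_of_pos (by norm_num)]; omega

theorem base_neg_lo {k : Int} (h1 : -768 ≤ k) (h2 : k < -384) :
    (-768 + 384 * PySem.Int.floordiv (k + 768) 384 : Int) = -768 := by
  rw [PySem.Int.floordiv_eq_ediv_of_pos (by norm_num)]; omega

theorem base_neg_hi {k : Int} (h1 : -384 ≤ k) (h2 : k < 0) :
    (-768 + 384 * PySem.Int.floordiv (k + 768) 384 : Int) = -384 := by
  rw [PySem.Int.floordiv_eq_ediv_of_pos (by norm_num)]; omega

-- ===== VERDICT (by name: the statement is the Claim_ definition above) =====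
theorem calculate_A_c_p_spec : Claim_equal_calculate_A_c_p := by
  intro c p k _ hpre
  obtain ⟨hk1, hk2, hhit⟩ := hpre
  unfold Spec_calculate_A_c_p calculate_A_c_p calculate_A_c_p_alt
  by_cases h0 : k = 0 ∨ k = -769
  · simp [h0]
  rw [if_neg h0, if_neg h0, if_neg (by push Not; omega :
      ¬¬(-769 ≤ k ∧ k ≤ 768))]
  have hp : ∀ base, pvHit c k base →
      ((-768 ≤ k ∧ k < -384 ∧ base = -768) ∨ (-384 ≤ k ∧ k < 0 ∧ base = -384) ∨
       (0 < k ∧ k ≤ 384 ∧ base = 1) ∨ (384 < k ∧ k ≤ 768 ∧ base = 385)) → -70 ≤ p ∧ p < 70 := by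
    intro base hb hcase
    apply hhit
    refine ⟨h0, ?_⟩
    rcases hcase with ⟨a1, a2, rfl⟩ | ⟨a1, a2, rfl⟩ | ⟨a1, a2, rfl⟩ | ⟨a1, a2, rfl⟩
    · exact .inl ⟨a1, a2, hb⟩
    · exact .inr (.inl ⟨a1, a2, hb⟩)
    · exact .inr (.inr (.inl ⟨a1, a2, hb⟩))
    · exact .inr (.inr (.inr ⟨a1, a2, hb⟩))
  by_cases h1 : -768 ≤ k ∧ k < -384
  · rw [if_pos h1, if_neg (by omega : ¬ (0:Int) < k), base_neg_lo h1.1 h1.2]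
    exact (branch_eq c p k (-768) (fun hb => hp _ hb (.inl ⟨h1.1, h1.2, rfl⟩)))
  rw [if_neg h1]
  by_cases h2 : -384 ≤ k ∧ k < 0
  · rw [if_pos h2, if_neg (by omega : ¬ 0 < k), base_neg_hi h2.1 h2.2]
    exact (branch_eq c p k (-384) (fun hb => hp _ hb (.inr (.inl ⟨h2.1, h2.2, rfl⟩))))
  rw [if_neg h2]
  by_cases h3 : 0 < k ∧ k ≤ 384
  · rw [if_pos h3, if_pos h3.1, base_pos_lo h3.1 h3.2]
    exact (branch_eq c p k 1 (fun hb => hp _ hb (.inr (.inr (.inl ⟨h3.1, h3.2, rfl⟩)))))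
  rw [if_neg h3]
  have h4 : 384 < k ∧ k ≤ 768 := by omega
  rw [if_pos h4, if_pos (by omega : (0:Int) < k), base_pos_hi h4.1 h4.2]
  exact (branch_eq c p k 385 (fun hb => hp _ hb (.inr (.inr (.inr ⟨h4.1, h4.2, rfl⟩)))))
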